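-- pv_equiv track=rewrite | github.com/kheirie/Learning-NLP-with-disaster-tweets | preprocessing.py | strip_all_entities
-- ===== SOURCE A (Python) =====
-- import string
--
-- def strip_all_entities(x):
--     entity_prefixes = ['@', '#']
--     for separator in string.punctuation:
--         if separator not in entity_prefixes:
--             x = x.replace(separator, ' ')
--     words = []
--     for word in x.split():
--         word = word.strip()
--         if word:
--             if word[0] not in entity_prefixes:
--                 words.append(word)
--     return ' '.join(words)
-- ===== SOURCE B (Python) =====
-- import string
--
-- def strip_all_entities(x):
--     seps = set(string.punctuation) - {'@', '#'}
--     out = []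
--     buf = []
--     for ch in x:
--         if ch.isspace() or ch in seps:
--             if buf and buf[0] not in '@#':
--                 out.append(''.join(buf))
--             buf = []
--         else:
--             buf.append(ch)
--     if buf and buf[0] not in '@#':
--         out.append(''.join(buf))
--     return ' '.join(out)
-- ===== Notes on version B (the rewrite author's own statement) =====
-- stated objective: alternative
-- what changed: Replaces A's 30 sequential str.replace passes followed by split()-then-filter with a single character-by-character scan that tokenizes on whitespace/separator characters and filters @/#-prefixed tokens inline.
import Mathlib
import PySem

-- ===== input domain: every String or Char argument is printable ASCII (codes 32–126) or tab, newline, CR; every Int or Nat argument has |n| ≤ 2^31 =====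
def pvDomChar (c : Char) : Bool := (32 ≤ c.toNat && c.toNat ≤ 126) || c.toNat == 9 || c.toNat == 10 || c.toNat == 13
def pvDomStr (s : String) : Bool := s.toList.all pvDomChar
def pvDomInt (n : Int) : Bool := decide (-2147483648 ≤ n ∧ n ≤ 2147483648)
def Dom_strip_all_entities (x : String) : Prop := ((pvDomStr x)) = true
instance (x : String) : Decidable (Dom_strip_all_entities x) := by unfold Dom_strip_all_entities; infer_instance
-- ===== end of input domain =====

-- B replaces A's 30 sequential str.replace passes + split/filter by ONE char-by-char scan that
-- tokenizes and filters inline (alternative decomposition; no speed claim).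

-- string.punctuation
def pvPunct : List Char := "!\"#$%&'()*+,-./:;<=>?@[\\]^_`{|}~".toList

-- ===== PORT A =====
def strip_all_entities (x : String) : String :=
  let x1 := pvPunct.foldl
    (fun s c => if c ∈ ['@', '#'] then s else PySem.Chars.replace s [c] [' ']) x.toList
  let words := (PySem.Chars.split₀ x1).foldl
    (fun ws w =>
      let w2 := PySem.Chars.strip w
      if w2 ≠ [] then
        match w2 with
        | [] => ws           -- unreachable: guarded by w2 ≠ []
        | h :: _ => if h ∈ ['@', '#'] then ws else ws ++ [w2]
      else ws) []
  String.mk (PySem.Chars.join [' '] words)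

-- ===== PORT B =====
-- seps = set(string.punctuation) - {'@', '#'}
def pvSeps : PySem.Set Char := PySem.Set.diff (PySem.Set.ofList pvPunct) (PySem.Set.ofList ['@', '#'])

-- the duplicated flush: "if buf and buf[0] not in '@#': out.append(''.join(buf))"
def pvFlush (buf : List Char) (out : List (List Char)) : List (List Char) :=
  match buf with
  | [] => out
  | h :: _ => if h == '@' || h == '#' then out else out ++ [buf]

-- the for-loop over the characters of x
def pvScan : List Char → List Char → List (List Char) → List (List Char)
  | [], buf, out => pvFlush buf out
  | c :: rest, buf, out =>
      if PySem.Chars.isspace c || PySem.Set.contains pvSeps c then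
        pvScan rest [] (pvFlush buf out)
      else
        pvScan rest (buf ++ [c]) out

def strip_all_entities_alt (x : String) : String :=
  String.mk (PySem.Chars.join [' '] (pvScan x.toList [] []))

-- ===== PRECONDITION & SPEC =====
def Spec_strip_all_entities (x : String) (out : String) : Prop := out = strip_all_entities_alt x
instance (x : String) (out : String) : Decidable (Spec_strip_all_entities x out) := by unfold Spec_strip_all_entities; infer_instance

-- ===== CLAIM (what is proved, stated in full; the proofs are below) =====
def Claim_equal_strip_all_entities : Prop := ∀ (x : String), Dom_strip_all_entities x → Spec_strip_all_entities x (strip_all_entities x)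

-- ===== LEMMAS AND PROOFS =====

-- the character substitution A's replace loop performs
def pvG (c : Char) : Char := if c ∈ pvPunct ∧ c ∉ ['@', '#'] then ' ' else c

-- A's filter on the word list
def pvKeep (ws : List (List Char)) : List (List Char) :=
  ws.filter (fun w => match w with | [] => false | h :: _ => !(h == '@' || h == '#'))

lemma pvKeep_append (ws vs : List (List Char)) : pvKeep (ws ++ vs) = pvKeep ws ++ pvKeep vs := by
  simp [pvKeep]

lemma pvKeep_flush (h : Char) (t : List Char) (acc : List (List Char)) :
    pvKeep (acc ++ [h :: t]) = pvFlush (h :: t) (pvKeep acc) := by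
  rw [pvKeep_append]
  simp only [pvFlush]
  by_cases hh : (h == '@' || h == '#') = true
  · rw [if_pos hh]
    have : pvKeep [h :: t] = [] := by
      simp only [pvKeep, List.filter]
      rcases Bool.or_eq_true_iff.mp hh with h1 | h1 <;> simp [h1]
    rw [this, List.append_nil]
  · rw [if_neg hh]
    have : pvKeep [h :: t] = [h :: t] := by
      simp only [pvKeep, List.filter]
      simp only [Bool.or_eq_true_iff, not_or] at hh
      simp [hh.1, hh.2]
    rw [this]

lemma replace_go_single (c : Char) :
    ∀ (fuel : Nat) (l acc : List Char), l.length ≤ fuel →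
      PySem.Chars.replace.go [c] [' '] fuel l acc
        = acc.reverse ++ l.map (fun d => if d = c then ' ' else d) := by
  intro fuel
  induction fuel with
  | zero =>
      intro l acc h
      have : l = [] := List.eq_nil_of_length_eq_zero (Nat.le_zero.mp h)
      subst this; simp [PySem.Chars.replace.go]
  | succ n ih =>
      intro l acc h
      cases l with
      | nil => simp [PySem.Chars.replace.go]
      | cons d t =>
          by_cases hd : d = c
          · subst hd
            have hpre : List.isPrefixOf [d] (d :: t) = true := by
              simp [List.isPrefixOf]
            simp only [PySem.Chars.replace.go, hpre, if_pos, List.length_cons,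
              List.length_nil, List.drop_succ_cons, List.drop_zero, List.reverse_cons,
              List.reverse_nil, List.nil_append, List.singleton_append]
            rw [ih t (' ' :: acc) (by simpa using Nat.lt_succ_iff.mp (by simpa using h))]
            simp
          · have hpre2 : List.isPrefixOf [c] (d :: t) = false := by
              simp [List.isPrefixOf]
              intro hcd; exact absurd hcd.symm hd
            simp only [PySem.Chars.replace.go, hpre2, Bool.false_eq_true, if_false]
            rw [ih t (d :: acc) (by simpa using Nat.lt_succ_iff.mp (by simpa using h))]
            simp [hd]

lemma replace_single (s : List Char) (c : Char) :
    PySem.Chars.replace s [c] [' '] = s.map (fun d => if d = c then ' ' else d) := by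
  have : ([c] : List Char).isEmpty = false := rfl
  simp only [PySem.Chars.replace, this, Bool.false_eq_true, if_false]
  simpa using replace_go_single c s.length s [] (le_refl _)

lemma foldl_replace (ps : List Char) (hsp : (' ' : Char) ∉ ps) :
    ∀ cs : List Char,
      ps.foldl (fun s c => if c ∈ ['@', '#'] then s else PySem.Chars.replace s [c] [' ']) cs
        = cs.map (fun d => if d ∈ ps ∧ d ∉ ['@', '#'] then ' ' else d) := by
  induction ps with
  | nil => intro cs; simp
  | cons c rest ih =>
      intro cs
      have hsp' : (' ' : Char) ∉ rest := fun h => hsp (List.mem_cons_of_mem _ h)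
      by_cases hc : c ∈ ['@', '#']
      · simp only [List.foldl_cons, hc, if_pos]
        rw [ih hsp' cs]
        apply List.map_congr_left
        intro d _
        by_cases hdr : d ∈ rest ∧ d ∉ ['@', '#']
        · simp [hdr, List.mem_cons]
        · by_cases hdc : d = c
          · subst hdc; simp [hc]
          · simp only [List.mem_cons]
            by_cases h1 : d ∈ rest <;> by_cases h2 : d ∈ ['@', '#'] <;>
              simp_all
      · simp only [List.foldl_cons, hc, if_false]
        rw [replace_single, ih hsp', List.map_map]
        apply List.map_congr_left
        intro d _
        simp only [Function.comp]
        by_cases hdc : d = c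
        · subst hdc
          have : (' ' : Char) ∉ rest := hsp'
          simp [this, hc, List.mem_cons]
        · simp only [if_neg hdc]
          by_cases h1 : d ∈ rest <;> by_cases h2 : d ∈ ['@', '#'] <;>
            simp_all [List.mem_cons]

-- pvSeps as a filter of the punctuation list
lemma pvSeps_eq : pvSeps = pvPunct.filter (fun d => !(d == '@' || d == '#')) := by decide

lemma contains_pvSeps (c : Char) :
    PySem.Set.contains pvSeps c = decide (c ∈ pvPunct ∧ c ∉ ['@', '#']) := by
  rw [pvSeps_eq]
  have h1 : PySem.Set.contains (pvPunct.filter (fun d => !(d == '@' || d == '#'))) c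
      = decide (c ∈ pvPunct.filter (fun d => !(d == '@' || d == '#'))) := by
    simp [PySem.Set.contains]
  rw [h1, decide_eq_decide]
  simp only [List.mem_filter, List.mem_cons, Bool.not_eq_true',
    Bool.or_eq_false_iff, beq_eq_false_iff_ne, ne_eq]
  tauto

lemma isspace_pvG_iff (c : Char) :
    PySem.Chars.isspace (pvG c)
      = (PySem.Chars.isspace c || decide (c ∈ pvPunct ∧ c ∉ ['@', '#'])) := by
  by_cases h : c ∈ pvPunct ∧ c ∉ ['@', '#']
  · have h1 : pvG c = ' ' := by simp only [pvG]; rw [if_pos h]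
    have h2 : decide (c ∈ pvPunct ∧ c ∉ ['@', '#']) = true := by simpa using h
    rw [h1, h2, Bool.or_true]
    decide
  · have h1 : pvG c = c := by simp only [pvG]; rw [if_neg h]
    have h2 : decide (c ∈ pvPunct ∧ c ∉ ['@', '#']) = false := by simpa using h
    rw [h1, h2, Bool.or_false]

-- the crux: A's whitespace split of the substituted string, filtered, IS B's scan
lemma scan_eq :
    ∀ (cs buf : List Char) (acc : List (List Char)),
      (∀ b ∈ buf, PySem.Chars.isspace b = false ∧ ¬(b ∈ pvPunct ∧ b ∉ ['@', '#'])) →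
      pvKeep (PySem.Chars.split₀.go (cs.map pvG) buf.reverse acc)
        = pvScan cs buf (pvKeep acc.reverse) := by
  intro cs
  induction cs with
  | nil =>
      intro buf acc hbuf
      cases buf with
      | nil => simp [PySem.Chars.split₀.go, pvScan, pvFlush]
      | cons h t =>
          simp only [List.map_nil, PySem.Chars.split₀.go, List.reverse_cons]
          have hne : (t.reverse ++ [h]).isEmpty = false := by simp
          simp only [hne, Bool.false_eq_true, if_false, List.reverse_append,
            List.reverse_reverse, List.reverse_cons, List.reverse_nil,
            List.nil_append, List.singleton_append, pvScan]
          exact pvKeep_flush h t acc.reverse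
  | cons c rest ih =>
      intro buf acc hbuf
      simp only [List.map_cons, PySem.Chars.split₀.go]
      by_cases hs : PySem.Chars.isspace (pvG c) = true
      · have hcond : (PySem.Chars.isspace c || PySem.Set.contains pvSeps c) = true := by
          rw [contains_pvSeps, ← isspace_pvG_iff]; exact hs
        simp only [hs, if_pos]
        cases buf with
        | nil =>
            simp only [List.reverse_nil, List.isEmpty_nil, if_pos]
            have hih := ih [] acc (by intro b hb; cases hb)
            simp only [List.reverse_nil] at hih
            rw [hih]
            simp only [pvScan]
            rw [hcond]
            simp [pvFlush]
        | cons h t =>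
            simp only [List.reverse_cons]
            have hne : (t.reverse ++ [h]).isEmpty = false := by simp
            simp only [hne, Bool.false_eq_true, if_false, List.reverse_append,
              List.reverse_reverse, List.reverse_cons, List.reverse_nil,
              List.nil_append, List.singleton_append]
            have hih := ih [] ((h :: t) :: acc) (by intro b hb; cases hb)
            simp only [List.reverse_nil] at hih
            rw [hih]
            simp only [pvScan]
            rw [hcond]
            simp only [if_pos]
            congr 1
            simp only [List.reverse_cons]
            exact pvKeep_flush h t acc.reverse
      · have hcond : (PySem.Chars.isspace c || PySem.Set.contains pvSeps c) = false := by
          rw [contains_pvSeps, ← isspace_pvG_iff]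
          simpa using hs
        have hnp : ¬(c ∈ pvPunct ∧ c ∉ ['@', '#']) := by
          intro h
          apply hs
          simp only [pvG]
          rw [if_pos h]
          decide
        have hgc : pvG c = c := by simp only [pvG]; rw [if_neg hnp]
        have hcs : PySem.Chars.isspace c = false := by
          rw [← hgc]; simpa using hs
        simp only [hs, Bool.false_eq_true, if_false]
        have hbuf' : ∀ b ∈ buf ++ [c], PySem.Chars.isspace b = false ∧ ¬(b ∈ pvPunct ∧ b ∉ ['@', '#']) := by
          intro b hb
          rcases List.mem_append.mp hb with hb | hb
          · exact hbuf b hb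
          · simp at hb; subst hb; exact ⟨hcs, hnp⟩
        have := ih (buf ++ [c]) acc hbuf'
        simp only [List.reverse_append, List.reverse_cons, List.reverse_nil,
          List.nil_append, List.singleton_append] at this
        rw [hgc]
        rw [this]
        simp only [pvScan]
        rw [hcond]
        simp

-- every token split₀ produces is nonempty and whitespace-free
lemma split_go_tokens :
    ∀ (s cur : List Char) (acc : List (List Char)),
      (∀ ch ∈ cur, PySem.Chars.isspace ch = false) →
      (∀ w ∈ acc, w ≠ [] ∧ ∀ ch ∈ w, PySem.Chars.isspace ch = false) →
      ∀ w ∈ PySem.Chars.split₀.go s cur acc,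
        w ≠ [] ∧ ∀ ch ∈ w, PySem.Chars.isspace ch = false := by
  intro s
  induction s with
  | nil =>
      intro cur acc hcur hacc w hw
      simp only [PySem.Chars.split₀.go] at hw
      by_cases hc : cur.isEmpty = true
      · simp only [hc, if_pos, List.mem_reverse] at hw
        exact hacc w hw
      · simp only [hc, Bool.false_eq_true, if_false, List.mem_reverse, List.mem_cons] at hw
        rcases hw with hw | hw
        · subst hw
          constructor
          · simp [List.isEmpty_iff] at hc
            simpa using hc
          · intro ch hch
            exact hcur ch (List.mem_reverse.mp hch)
        · exact hacc w hw
  | cons c rest ih =>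
      intro cur acc hcur hacc w hw
      simp only [PySem.Chars.split₀.go] at hw
      by_cases hs : PySem.Chars.isspace c = true
      · simp only [hs, if_pos] at hw
        by_cases hc : cur.isEmpty = true
        · simp only [hc, if_pos] at hw
          exact ih [] acc (by intro ch h; cases h) hacc w hw
        · simp only [hc, Bool.false_eq_true, if_false] at hw
          refine ih [] (cur.reverse :: acc) (by intro ch h; cases h) ?_ w hw
          intro v hv
          rcases List.mem_cons.mp hv with hv | hv
          · subst hv
            constructor
            · simp [List.isEmpty_iff] at hc
              simpa using hc
            · intro ch hch
              exact hcur ch (List.mem_reverse.mp hch)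
          · exact hacc v hv
      · simp only [hs, Bool.false_eq_true, if_false] at hw
        refine ih (c :: cur) acc ?_ hacc w hw
        intro ch hch
        rcases List.mem_cons.mp hch with hch | hch
        · subst hch; simpa using hs
        · exact hcur ch hch

lemma strip_of_no_space (w : List Char)
    (h : ∀ ch ∈ w, PySem.Chars.isspace ch = false) : PySem.Chars.strip w = w := by
  have hl : PySem.Chars.lstrip w = w := by
    simp only [PySem.Chars.lstrip]
    apply List.dropWhile_eq_self_iff.mpr
    intro hl
    simp [h _ (List.getElem_mem hl)]
  have hr : PySem.Chars.rstrip w = w := by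
    simp only [PySem.Chars.rstrip]
    rw [List.dropWhile_eq_self_iff.mpr, List.reverse_reverse]
    intro hl
    have hlt : w.length - 1 < w.length := by
      simp only [List.length_reverse] at hl; omega
    have hm : w[w.length - 1] ∈ w := List.getElem_mem hlt
    simp [List.getElem_reverse, h _ hm]
  simp [PySem.Chars.strip, hl, hr]

-- A's filtering fold over the word list is pvKeep
lemma fold_words_eq_keep (ws : List (List Char))
    (hws : ∀ w ∈ ws, w ≠ [] ∧ ∀ ch ∈ w, PySem.Chars.isspace ch = false) :
    ws.foldl
      (fun acc w =>
        let w2 := PySem.Chars.strip w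
        if w2 ≠ [] then
          match w2 with
          | [] => acc
          | h :: _ => if h ∈ ['@', '#'] then acc else acc ++ [w2]
        else acc) []
      = pvKeep ws := by
  have hcongr := PySem.List.foldl_congr_mem ws
    (fun acc w =>
      let w2 := PySem.Chars.strip w
      if w2 ≠ [] then
        match w2 with
        | [] => acc
        | h :: _ => if h ∈ ['@', '#'] then acc else acc ++ [w2]
      else acc)
    (fun acc w =>
      if (match w with | [] => false | h :: _ => !(h == '@' || h == '#')) = true
      then acc ++ [w] else acc)
    []
    (by
      intro acc w hw
      obtain ⟨hne, hnosp⟩ := hws w hw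
      have hst : PySem.Chars.strip w = w := strip_of_no_space w hnosp
      simp only [hst]
      cases w with
      | nil => exact absurd rfl hne
      | cons h t =>
          simp only [if_pos (by simp : (h :: t : List Char) ≠ [])]
          by_cases hh : h ∈ ['@', '#']
          · have : (h == '@' || h == '#') = true := by
              simp [List.mem_cons] at hh
              rcases hh with h1 | h1 <;> simp [h1]
            simp [hh, this]
          · have : (h == '@' || h == '#') = false := by
              simp [List.mem_cons] at hh
              simp; exact ⟨hh.1, hh.2⟩
            simp [hh, this])
  rw [hcongr]
  have := PySem.List.foldl_append_if
    (fun w : List Char => match w with | [] => false | h :: _ => !(h == '@' || h == '#'))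
    (fun w : List Char => w) ws ([] : List (List Char))
  simpa [pvKeep] using this

-- ===== VERDICT (by name: the statement is the Claim_ definition above) =====
theorem strip_all_entities_spec : Claim_equal_strip_all_entities := by
  intro x _
  unfold Spec_strip_all_entities strip_all_entities strip_all_entities_alt
  have hrep := foldl_replace pvPunct (by decide) x.toList
  simp only [hrep]
  have hg : (x.toList.map fun d => if d ∈ pvPunct ∧ d ∉ ['@', '#'] then ' ' else d)
      = x.toList.map pvG := by
    apply List.map_congr_left; intro d _; rfl
  rw [hg]
  have htok := split_go_tokens (x.toList.map pvG) [] []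
    (by intro ch h; cases h) (by intro w h; cases h)
  have hfold := fold_words_eq_keep (PySem.Chars.split₀ (x.toList.map pvG))
    (by intro w hw; exact htok w hw)
  simp only [PySem.Chars.split₀] at hfold ⊢
  rw [hfold]
  have hscan := scan_eq x.toList [] [] (by intro b hb; cases hb)
  simp only [List.reverse_nil] at hscan
  rw [hscan]
  simp [pvKeep]
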